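-- pv_equiv track=rewrite | github.com/gwqw/LessonsSolution | checkio/04_OReilly/04_OReilly_05_GhostAge.py | get_age_opacity
-- ===== SOURCE A (Python) =====
-- def give_fibonacci():
--     res = [1, 1]
--     while True:
--       res.append(res[-1] + res[-2])
--       yield res[-3]
--
-- def get_age_opacity(op):
--     if op == 10000: return 0
--     # create fibonacci list
--     fibonacci = []
--     generator = give_fibonacci()
--     for i in range(1000):
--         fibonacci.append(next(generator))
--
--     # find need opacity
--     opacity = [10000]
--     for year in range(1,5000):
--         if year in fibonacci:
--             k = -year
--         else:
--             k = +1
--         opacity.append(opacity[-1] + k)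
--         if opacity[-1] == op:
--             return year
-- ===== SOURCE B (Python) =====
-- def get_age_opacity(op):
--     if op == 10000:
--         return 0
--     # fibonacci years below 5000, distinct and ascending: start from (1, 2)
--     fibs = []
--     a, b = 1, 2
--     while a < 5000:
--         fibs.append(a)
--         a, b = b, a + b
--     year, opacity = 0, 10000
--     for f in fibs:
--         # non-fib years year+1 .. f-1: opacity rises by exactly +1 each year
--         gap = f - 1 - year
--         if opacity < op <= opacity + gap:
--             return year + (op - opacity)
--         opacity += gap - f          # the +1 run, then the drop at fib year f
--         if opacity == op:
--             return f
--         year = f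
--     # tail of non-fib years after the last fib year, up to 4999
--     gap = 4999 - year
--     if opacity < op <= opacity + gap:
--         return year + (op - opacity)
--     return None
-- ===== Notes on version B (the rewrite author's own statement) =====
-- stated objective: faster
-- what changed: B replaces A's year-by-year simulation (a step per year, each scanning a thousand-element big-integer fibonacci list for membership) by a segment walk over the fibonacci years below the year limit: between consecutive fibonacci years opacity rises by exactly one per year, so each such run is answered by a single constant-time interval test, and the fibonacci-year drop is tested directly.
import Mathlib
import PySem

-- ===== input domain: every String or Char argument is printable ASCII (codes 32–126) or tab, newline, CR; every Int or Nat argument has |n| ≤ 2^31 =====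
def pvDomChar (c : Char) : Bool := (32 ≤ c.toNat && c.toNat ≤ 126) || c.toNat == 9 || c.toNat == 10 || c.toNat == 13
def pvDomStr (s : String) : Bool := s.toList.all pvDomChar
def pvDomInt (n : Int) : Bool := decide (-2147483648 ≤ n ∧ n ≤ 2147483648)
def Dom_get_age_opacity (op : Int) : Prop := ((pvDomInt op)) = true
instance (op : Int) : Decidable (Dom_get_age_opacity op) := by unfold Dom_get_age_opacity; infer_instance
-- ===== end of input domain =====

-- B walks the 18 fibonacci-year segments with one O(1) interval test per +1 run instead of
-- simulating all 5000 years against a 1000-element big-integer fibonacci list (objective: faster).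

-- ===== PORT A =====

-- Python indexing res[-1], res[-2], res[-3] (always in range at every call site below)
def pvGet (xs : List Int) (i : Int) : Int := (PySem.List.pyGet? xs i).getD 0

-- 'for i in range(1000): fibonacci.append(next(generator))' with the generator's state:
-- res.append(res[-1] + res[-2]); yield res[-3]
def pvFibLoop : Nat → List Int → List Int → List Int
  | 0, _, fibonacci => fibonacci
  | n + 1, res, fibonacci =>
      let res := res ++ [pvGet res (-1) + pvGet res (-2)]
      pvFibLoop n res (fibonacci ++ [pvGet res (-3)])

def pvFib1000 : List Int := pvFibLoop 1000 [1, 1] []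

-- 'for year in range(1,5000)': opacity kept as the full Python list, only appended to
def pvAgo (op : Int) : List Int → List Int → Option Int
  | [], _ => none
  | year :: ys, opacity =>
      let k : Int := if pvFib1000.contains year then -year else 1
      let opacity := opacity ++ [pvGet opacity (-1) + k]
      if pvGet opacity (-1) = op then some year else pvAgo op ys opacity

def get_age_opacity (op : Int) : Option Int :=
  if op = 10000 then some 0
  else pvAgo op (PySem.List.pyRange 1 5000 1) [10000]

-- ===== PORT B =====

-- 'while a < 5000: fibs.append(a); a, b = b, a + b' starting from (1, 2);
-- the extra 'a < b' conjunct is a termination guard only (invariant at every call site)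
def pvBFibs (a b : Int) : List Int :=
  if _h : a < 5000 ∧ a < b then a :: pvBFibs b (a + b) else []
termination_by (5000 - a).toNat
decreasing_by omega

-- 'for f in fibs' with state (year, opacity), then the tail run up to 4999
def pvBLoop (op : Int) : List Int → Int → Int → Option Int
  | [], year, opacity =>
      let gap := 4999 - year
      if opacity < op ∧ op ≤ opacity + gap then some (year + (op - opacity)) else none
  | f :: fs, year, opacity =>
      let gap := f - 1 - year
      if opacity < op ∧ op ≤ opacity + gap then some (year + (op - opacity))
      else
        let opacity := opacity + (gap - f)
        if opacity = op then some f else pvBLoop op fs f opacity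

def get_age_opacity_alt (op : Int) : Option Int :=
  if op = 10000 then some 0
  else pvBLoop op (pvBFibs 1 2) 0 10000

-- ===== PRECONDITION & SPEC =====
def Spec_get_age_opacity (op : Int) (out : Option Int) : Prop := out = get_age_opacity_alt op
instance (op : Int) (out : Option Int) : Decidable (Spec_get_age_opacity op out) := by unfold Spec_get_age_opacity; infer_instance

-- ===== CLAIM (what is proved, stated in full; the proofs are below) =====
def Claim_equal_get_age_opacity : Prop := ∀ (op : Int), Dom_get_age_opacity op → Spec_get_age_opacity op (get_age_opacity op)

-- ===== LEMMAS AND PROOFS =====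

-- the distinct fibonacci years below 5000, ascending
def pvF : List Int := [1, 2, 3, 5, 8, 13, 21, 34, 55, 89, 144, 233, 377, 610, 987, 1597, 2584, 4181]

-- clean pair-state fibonacci generator (proof artifact)
def pvFibGen : Nat → Int → Int → List Int
  | 0, _, _ => []
  | n + 1, a, b => a :: pvFibGen n b (a + b)

theorem pvGet_append_last (xs : List Int) (o : Int) : pvGet (xs ++ [o]) (-1) = o := by
  simp [pvGet, PySem.List.pyGet?_neg_one]

theorem pvGet_append_two_1 (xs : List Int) (p q : Int) : pvGet (xs ++ [p, q]) (-1) = q := by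
  simp [pvGet, PySem.List.pyGet?_neg_one]

theorem pvGet_append_two_2 (xs : List Int) (p q : Int) : pvGet (xs ++ [p, q]) (-2) = p := by
  have := PySem.List.pyGet?_neg_natCast (xs := xs ++ [p, q]) (k := 2) (by omega) (by simp)
  simp [pvGet, show (-2 : Int) = -((2:Nat):Int) by norm_num, this]

theorem pvGet_append_three_3 (xs : List Int) (p q r : Int) : pvGet (xs ++ [p, q, r]) (-3) = p := by
  have := PySem.List.pyGet?_neg_natCast (xs := xs ++ [p, q, r]) (k := 3) (by omega) (by simp)
  simp [pvGet, show (-3 : Int) = -((3:Nat):Int) by norm_num, this]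

theorem pvFibLoop_eq (n : Nat) : ∀ (xs acc : List Int) (p q : Int),
    pvFibLoop n (xs ++ [p, q]) acc = acc ++ pvFibGen n p q := by
  induction n with
  | zero => intro xs acc p q; simp [pvFibLoop, pvFibGen]
  | succ m ih =>
      intro xs acc p q
      show pvFibLoop m ((xs ++ [p, q]) ++ [pvGet (xs ++ [p, q]) (-1) + pvGet (xs ++ [p, q]) (-2)])
        (acc ++ [pvGet ((xs ++ [p, q]) ++ [pvGet (xs ++ [p, q]) (-1) + pvGet (xs ++ [p, q]) (-2)]) (-3)])
        = acc ++ pvFibGen (m + 1) p q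
      rw [pvGet_append_two_1, pvGet_append_two_2]
      have h3 : (xs ++ [p, q]) ++ [q + p] = xs ++ [p, q, q + p] := by simp
      rw [h3, pvGet_append_three_3]
      have h4 : xs ++ [p, q, q + p] = (xs ++ [p]) ++ [q, q + p] := by simp
      rw [h4, ih]
      have : q + p = p + q := by ring
      simp [pvFibGen, this]

theorem pvFib1000_eq : pvFib1000 = pvFibGen 1000 1 1 := by
  have : ([1, 1] : List Int) = [] ++ [1, 1] := by simp
  rw [pvFib1000, this, pvFibLoop_eq]; simp

set_option maxRecDepth 4000 in
theorem pvFibGen_split : pvFibGen 1000 1 1 =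
    (1 :: pvF) ++ pvFibGen 981 6765 10946 := by
  rw [show (1000 : Nat) = 19 + 981 from rfl]
  simp [pvFibGen, pvF]

theorem pvFibGen_ge (n : Nat) : ∀ (a b z : Int), 5000 ≤ a → 5000 ≤ b →
    z ∈ pvFibGen n a b → 5000 ≤ z := by
  induction n with
  | zero => intro a b z _ _ h; simp [pvFibGen] at h
  | succ m ih =>
      intro a b z ha hb h
      simp only [pvFibGen, List.mem_cons] at h
      rcases h with h | h
      · omega
      · exact ih b (a + b) z hb (by omega) h

theorem mem_fib_small (y : Int) (hy : y < 5000) :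
    pvFib1000.contains y = decide (y ∈ pvF) := by
  rw [pvFib1000_eq, pvFibGen_split]
  have h1 : (y ∈ (1 :: pvF) ++ pvFibGen 981 6765 10946) ↔ y ∈ pvF := by
    constructor
    · intro h
      rcases List.mem_append.mp h with h | h
      · rcases List.mem_cons.mp h with h | h
        · rw [h]; simp [pvF]
        · exact h
      · exact absurd (pvFibGen_ge 981 6765 10946 y (by norm_num) (by norm_num) h) (by omega)
    · intro h; exact List.mem_append.mpr (Or.inl (List.mem_cons.mpr (Or.inr h)))
  simp only [List.contains_eq_mem]
  exact decide_eq_decide.mpr h1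

-- A's loop with only the last opacity value kept, membership test abstracted
def pvALoop (op : Int) (mem : Int → Bool) : List Int → Int → Option Int
  | [], _ => none
  | y :: ys, o =>
      let o2 := o + (if mem y then -y else 1)
      if o2 = op then some y else pvALoop op mem ys o2

theorem pvAgo_eq (op : Int) : ∀ (ys xs : List Int) (o : Int),
    pvAgo op ys (xs ++ [o]) = pvALoop op (fun y => pvFib1000.contains y) ys o := by
  intro ys
  induction ys with
  | nil => intro xs o; simp [pvAgo, pvALoop]
  | cons y ys ih =>
      intro xs o
      show (if pvGet ((xs ++ [o]) ++ [pvGet (xs ++ [o]) (-1) + _]) (-1) = op then some y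
            else pvAgo op ys ((xs ++ [o]) ++ [pvGet (xs ++ [o]) (-1) + _])) = _
      rw [pvGet_append_last, pvGet_append_last, ih]
      simp [pvALoop]

theorem pvALoop_congr (op : Int) (m1 m2 : Int → Bool) : ∀ (ys : List Int) (o : Int),
    (∀ y ∈ ys, m1 y = m2 y) → pvALoop op m1 ys o = pvALoop op m2 ys o := by
  intro ys
  induction ys with
  | nil => intro o _; rfl
  | cons y ys ih =>
      intro o h
      simp only [pvALoop, h y (List.mem_cons_self ..)]
      split_ifs <;>
        first
          | rfl
          | exact ih _ (fun z hz => h z (List.mem_cons_of_mem _ hz))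

-- a run of n consecutive non-fibonacci years: opacity rises by +1 each, first hit is t + (op - o)
theorem pvRun (op : Int) (mem : Int → Bool) (n : Nat) : ∀ (t o : Int) (ys : List Int),
    (∀ y, t < y → y ≤ t + n → mem y = false) →
    pvALoop op mem (PySem.List.pyRange (t + 1) (t + 1 + n) 1 ++ ys) o
      = if o < op ∧ op ≤ o + n then some (t + (op - o)) else pvALoop op mem ys (o + n) := by
  induction n with
  | zero =>
      intro t o ys _
      rw [PySem.List.pyRange_one_eq_nil (by omega)]
      simp only [List.nil_append, Nat.cast_zero, add_zero]
      split_ifs with h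
      · omega
      · rfl
  | succ m ih =>
      intro t o ys hmem
      have hmem' : ∀ y, t < y → y ≤ t + ((m : Int) + 1) → mem y = false := by
        intro y hy1 hy2
        exact hmem y hy1 (by push_cast; omega)
      have hm : mem (t + 1) = false := hmem' (t + 1) (by omega) (by omega)
      have hcast : (((m + 1 : Nat)) : Int) = (m : Int) + 1 := by push_cast; ring
      rw [hcast, PySem.List.pyRange_one_cons (by omega)]
      simp only [List.cons_append, pvALoop, hm, Bool.false_eq_true, if_false]
      have hrange : PySem.List.pyRange (t + 1 + 1) (t + 1 + ((m : Int) + 1)) 1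
          = PySem.List.pyRange ((t + 1) + 1) ((t + 1) + 1 + (m : Int)) 1 := by
        congr 1; ring
      rw [hrange, ih (t + 1) (o + 1) ys (fun y hy1 hy2 => hmem' y (by omega) (by omega))]
      have he : o + 1 + (m : Int) = o + ((m : Int) + 1) := by ring
      rw [he]
      split_ifs <;>
        first
          | rfl
          | (simp only [Option.some.injEq]; omega)
          | omega

-- the main segment correspondence: A's scan over years (t,5000) equals B's segment walk over fibs
theorem pvMain (op : Int) (mem : Int → Bool) : ∀ (fibs : List Int) (t o : Int),
    (t :: fibs).Pairwise (· < ·) →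
    (∀ f ∈ fibs, f < 5000) →
    t < 5000 →
    (∀ y, t < y → y < 5000 → mem y = decide (y ∈ fibs)) →
    pvALoop op mem (PySem.List.pyRange (t + 1) 5000 1) o = pvBLoop op fibs t o := by
  intro fibs
  induction fibs with
  | nil =>
      intro t o _ _ ht hmem
      have hn : (t + 1) + ((4999 - t).toNat : Int) = 5000 := by omega
      have hr : PySem.List.pyRange (t + 1) 5000 1
          = PySem.List.pyRange (t + 1) ((t + 1) + ((4999 - t).toNat : Int)) 1 ++ [] := by
        rw [hn]; simp
      rw [hr, pvRun op mem _ t o []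
        (fun y hy1 hy2 => by
          have : y < 5000 := by omega
          simp [hmem y hy1 this])]
      have hc : ((4999 - t).toNat : Int) = 4999 - t := by omega
      rw [hc]
      simp only [pvBLoop]
      split_ifs with h
      · rfl
      · rfl
  | cons f fs ih =>
      intro t o hpair hlt ht hmem
      have htf : t < f := (List.pairwise_cons.mp hpair).1 f (List.mem_cons_self ..)
      have hf5 : f < 5000 := hlt f (List.mem_cons_self ..)
      have hffs : ∀ z ∈ fs, f < z :=
        (List.pairwise_cons.mp (List.pairwise_cons.mp hpair).2).1
      -- split the year range at f
      rw [PySem.List.pyRange_one_append (t + 1) f 5000 (by omega) (by omega),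
          PySem.List.pyRange_one_cons (by omega : f < 5000)]
      have hn : f = (t + 1) + ((f - 1 - t).toNat : Int) := by omega
      have hr : PySem.List.pyRange (t + 1) f 1
          = PySem.List.pyRange (t + 1) ((t + 1) + ((f - 1 - t).toNat : Int)) 1 := by
        rw [← hn]
      rw [hr, pvRun op mem _ t o _
        (fun y hy1 hy2 => by
          have hyf : y < f := by omega
          rw [hmem y hy1 (by omega)]
          simp only [decide_eq_false_iff_not, List.mem_cons]
          push Not
          exact ⟨by omega, fun hz => absurd (hffs y hz) (by omega)⟩)]
      have hc : ((f - 1 - t).toNat : Int) = f - 1 - t := by omega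
      rw [hc]
      have hmemf : mem f = true := by
        rw [hmem f htf hf5]; simp
      have harith : o + (f - 1 - t) + -f = o + (f - 1 - t - f) := by ring
      simp only [pvBLoop, pvALoop, hmemf, if_true, harith]
      split_ifs with h1 h2
      · rfl
      · rfl
      · exact ih f (o + (f - 1 - t - f))
          (List.pairwise_cons.mp hpair).2
          (fun z hz => hlt z (List.mem_cons_of_mem _ hz))
          hf5
          (fun y hy1 hy2 => by
            rw [hmem y (by omega) hy2]
            simp only [List.mem_cons]
            have : y ≠ f := by omega
            simp [this])

theorem pvBFibs_eq : pvBFibs 1 2 = pvF := by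
  rw [pvBFibs]; norm_num
  rw [pvBFibs]; norm_num
  rw [pvBFibs]; norm_num
  rw [pvBFibs]; norm_num
  rw [pvBFibs]; norm_num
  rw [pvBFibs]; norm_num
  rw [pvBFibs]; norm_num
  rw [pvBFibs]; norm_num
  rw [pvBFibs]; norm_num
  rw [pvBFibs]; norm_num
  rw [pvBFibs]; norm_num
  rw [pvBFibs]; norm_num
  rw [pvBFibs]; norm_num
  rw [pvBFibs]; norm_num
  rw [pvBFibs]; norm_num
  rw [pvBFibs]; norm_num
  rw [pvBFibs]; norm_num
  rw [pvBFibs]; norm_num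
  rw [pvBFibs]; norm_num
  simp [pvF]

-- ===== VERDICT (by name: the statement is the Claim_ definition above) =====
theorem get_age_opacity_spec : Claim_equal_get_age_opacity := by
  intro op _
  unfold Spec_get_age_opacity get_age_opacity get_age_opacity_alt
  split_ifs with h
  · rfl
  · have h0 : ([10000] : List Int) = [] ++ [10000] := by simp
    rw [h0, pvAgo_eq]
    have h1 : PySem.List.pyRange 1 5000 1 = PySem.List.pyRange (0 + 1) 5000 1 := by norm_num
    rw [h1, pvALoop_congr op _ (fun y => decide (y ∈ pvF)) _ _
      (fun y hy => by
        have := PySem.List.mem_pyRange_one.mp hy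
        exact mem_fib_small y (by omega)),
      pvMain op _ pvF 0 10000 (by decide) (by decide) (by norm_num)
        (fun y _ _ => rfl),
      pvBFibs_eq]
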